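-- pv_equiv track=rewrite | github.com/daverbuj/CHONK | breakpoints/split_reads.py | get_qpos
-- ===== SOURCE A (Python) =====
-- def get_qpos(cigartuple=None):
-- 	# returns the first position on the query
-- 	# the first aligned portion relative to the query
-- 	# 1-base
-- 	qInd=0
-- 	qStart=0
-- 	for (flg,leng) in cigartuple:
-- 		if flg == 0 or flg == 1 or flg==4 or flg==7 or flg==8: qInd+=leng
-- 		# this is the first mapped postion
-- 		if (flg==0 or flg==7) and qStart==0:
-- 			qStart=qInd-leng+1
-- 			break
-- 	return qStart
-- ===== SOURCE B (Python) =====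
-- def get_qpos(cigartuple=None):
--     # B: single backward pass. Walking right-to-left, a flag-0/7 segment resets the
--     # accumulator to 1 (so the leftmost match wins); query-consuming flags 1/4/8 to
--     # its left add their lengths. None means no match seen yet -> return 0.
--     res = None
--     for flg, leng in reversed(list(cigartuple)):
--         if flg == 0 or flg == 7:
--             res = 1
--         elif res is not None and (flg == 1 or flg == 4 or flg == 8):
--             res += leng
--     return 0 if res is None else res
-- ===== Notes on version B (the rewrite author's own statement) =====
-- stated objective: alternative
-- what changed: Replaces A's forward loop with early break by a single backward (right-to-left) pass over the reversed list with an optional accumulator: each flag-0/7 segment resets it to 1 so the leftmost match wins, and flag-1/4/8 segments to its left add their lengths.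
import Mathlib
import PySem

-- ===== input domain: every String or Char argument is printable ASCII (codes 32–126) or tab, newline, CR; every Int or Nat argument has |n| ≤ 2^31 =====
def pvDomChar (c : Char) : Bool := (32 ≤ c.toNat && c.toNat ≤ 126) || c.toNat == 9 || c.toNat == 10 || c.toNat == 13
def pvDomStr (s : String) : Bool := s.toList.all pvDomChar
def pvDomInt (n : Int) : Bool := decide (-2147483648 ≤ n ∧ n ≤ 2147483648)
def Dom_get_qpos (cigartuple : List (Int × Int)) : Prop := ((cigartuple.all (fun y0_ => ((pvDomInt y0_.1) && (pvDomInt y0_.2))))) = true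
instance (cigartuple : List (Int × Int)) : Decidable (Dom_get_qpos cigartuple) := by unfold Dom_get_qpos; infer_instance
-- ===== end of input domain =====

-- B replaces A's forward loop with break by a single backward pass (foldl over the reversed list) with an Option accumulator; alternative decomposition, same cost.


-- ===== PORT A =====
-- A's forward loop with two accumulators and break, as structural recursion.
def get_qpos_go : List (Int × Int) → Int → Int → Int
  | [], _, qStart => qStart
  | (flg, leng) :: rest, qInd, qStart =>
    let qInd' := if flg == 0 || flg == 1 || flg == 4 || flg == 7 || flg == 8 then qInd + leng else qInd
    if (flg == 0 || flg == 7) && qStart == 0 then qInd' - leng + 1   -- qStart := qInd-leng+1; break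
    else get_qpos_go rest qInd' qStart

def get_qpos (cigartuple : List (Int × Int)) : Int :=
  get_qpos_go cigartuple 0 0

-- ===== PORT B =====
-- the body of B's backward loop
def altStep (res : Option Int) (p : Int × Int) : Option Int :=
  if p.1 == 0 || p.1 == 7 then some 1
  else match res with
    | none => none
    | some r => if p.1 == 1 || p.1 == 4 || p.1 == 8 then some (r + p.2) else some r

def get_qpos_alt (cigartuple : List (Int × Int)) : Int :=
  (cigartuple.reverse.foldl altStep none).getD 0

-- ===== PRECONDITION & SPEC =====
def Spec_get_qpos (cigartuple : List (Int × Int)) (out : Int) : Prop := out = get_qpos_alt cigartuple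
instance (cigartuple : List (Int × Int)) (out : Int) : Decidable (Spec_get_qpos cigartuple out) := by unfold Spec_get_qpos; infer_instance

-- ===== CLAIM =====
def Claim_equal_get_qpos : Prop := ∀ (cigartuple : List (Int × Int)), Dom_get_qpos cigartuple → Spec_get_qpos cigartuple (get_qpos cigartuple)

-- ===== LEMMAS AND PROOFS =====

-- A's loop on l, started at qInd = q, equals q shifted into B's backward result on l.
theorem go_eq (l : List (Int × Int)) (q : Int) :
    get_qpos_go l q 0 =
      match l.foldr (fun p acc => altStep acc p) none with
      | none => 0
      | some r => q + r := by
  induction l generalizing q with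
  | nil => simp [get_qpos_go]
  | cons a t ih =>
    obtain ⟨flg, leng⟩ := a
    by_cases h07 : flg = 0 ∨ flg = 7
    · rcases h07 with h | h <;> simp [get_qpos_go, altStep, h]
    · simp only [not_or] at h07
      obtain ⟨h0, h7⟩ := h07
      by_cases h148 : flg = 1 ∨ flg = 4 ∨ flg = 8
      · have hstep : get_qpos_go ((flg, leng) :: t) q 0 = get_qpos_go t (q + leng) 0 := by
          rcases h148 with h | h | h <;> simp [get_qpos_go, h]
        have h148b : (flg == 1 || flg == 4 || flg == 8) = true := by
          rcases h148 with h | h | h <;> simp [h]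
        rw [hstep, ih (q + leng)]
        simp only [List.foldr_cons]
        rcases hfold : t.foldr (fun p acc => altStep acc p) none with _ | r
        · simp [altStep, h0, h7]
        · have hn : ¬ (flg = 0 ∨ flg = 7) := by tauto
          simp only [altStep, h148b]
          simp [hn]
          ring
      · simp only [not_or] at h148
        obtain ⟨h1, h4, h8⟩ := h148
        have hstep : get_qpos_go ((flg, leng) :: t) q 0 = get_qpos_go t q 0 := by
          simp [get_qpos_go, h0, h1, h4, h7, h8]
        rw [hstep, ih q]
        simp only [List.foldr_cons]
        rcases hfold : t.foldr (fun p acc => altStep acc p) none with _ | r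
        · simp [altStep, h0, h7]
        · simp [altStep, h0, h1, h4, h7, h8]

-- ===== VERDICT =====
theorem get_qpos_spec : Claim_equal_get_qpos := by
  intro cig _
  unfold Spec_get_qpos get_qpos get_qpos_alt
  rw [List.foldl_reverse, go_eq]
  rcases cig.foldr (fun p acc => altStep acc p) none with _ | r <;> simp
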